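-- pv_equiv track=rewrite | github.com/KevinCarr42/AI-Translation-Pipeline | translate/document.py | reassemble_sentences
-- ===== SOURCE A (Python) =====
-- def reassemble_sentences(translated_chunks, chunk_metadata):
--     lines_dict = {}
--     for i, (translated_chunk, metadata) in enumerate(zip(translated_chunks, chunk_metadata)):
--         line_idx = metadata['line_idx']
--         if line_idx not in lines_dict:
--             lines_dict[line_idx] = []
--
--         lines_dict[line_idx].append(translated_chunk)
--
--     for line_idx in lines_dict:
--         if isinstance(lines_dict[line_idx], list):
--             lines_dict[line_idx] = ' '.join(lines_dict[line_idx])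
--
--     return '\n'.join(lines_dict[i] for i in sorted(lines_dict.keys()))
-- ===== SOURCE B (Python) =====
-- def reassemble_sentences(translated_chunks, chunk_metadata):
--     pairs = [(metadata['line_idx'], chunk)
--              for chunk, metadata in zip(translated_chunks, chunk_metadata)]
--     keys = sorted({k for k, _ in pairs})
--     return '\n'.join(' '.join(c for k, c in pairs if k == key) for key in keys)
-- ===== Notes on version B (the rewrite author's own statement) =====
-- stated objective: simpler
-- what changed: Replaces dict-grouping with mutation plus a value-rewriting second loop by a flat (line_idx, chunk) pair list: the sorted distinct keys are taken once and each line is produced by filtering the pair list, removing the dict entirely.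
import Mathlib
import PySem

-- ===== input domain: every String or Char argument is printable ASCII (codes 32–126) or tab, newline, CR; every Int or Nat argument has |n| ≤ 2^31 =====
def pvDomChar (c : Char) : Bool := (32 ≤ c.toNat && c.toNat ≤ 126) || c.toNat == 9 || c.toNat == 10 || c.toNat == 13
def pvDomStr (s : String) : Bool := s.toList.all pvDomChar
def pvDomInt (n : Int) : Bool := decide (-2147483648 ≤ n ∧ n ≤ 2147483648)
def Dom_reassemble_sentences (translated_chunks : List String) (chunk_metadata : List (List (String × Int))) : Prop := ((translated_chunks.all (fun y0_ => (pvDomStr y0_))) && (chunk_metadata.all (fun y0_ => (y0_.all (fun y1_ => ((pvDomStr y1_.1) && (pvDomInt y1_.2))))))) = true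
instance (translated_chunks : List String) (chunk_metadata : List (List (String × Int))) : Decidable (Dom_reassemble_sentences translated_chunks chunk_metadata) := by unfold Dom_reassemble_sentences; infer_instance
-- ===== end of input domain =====

-- ===== PORT A =====
-- B changes: the mutating dict-grouping of A is replaced by sorted distinct keys plus a
-- per-key filter over a flat pair list (objective: simpler; not faster).

-- metadata['line_idx']: first-match association-list lookup; Pre_ excludes the KeyError
-- (missing key) case, so the `.getD 0` default is never reached on admitted inputs.
def getLineIdx (metadata : List (String × Int)) : Int :=
  ((metadata.find? (fun kv => kv.1 == "line_idx")).map Prod.snd).getD 0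

def reassemble_sentences (translated_chunks : List String) (chunk_metadata : List (List (String × Int))) : String :=
  -- first loop: `if line_idx not in lines_dict: lines_dict[line_idx] = []` followed by
  -- `.append(translated_chunk)` is exactly `modify line_idx [] (· ++ [translated_chunk])`
  let lines_dict :=
    (translated_chunks.zip chunk_metadata).foldl
      (fun d p => d.modify (getLineIdx p.2) [] (fun l => l ++ [p.1]))
      PySem.Dict.empty
  -- second loop joins every (always-list) value with ' '; the final line joins the joined
  -- values over sorted keys — ported as one map over the sorted keys computing both steps
  PySem.Str.join "\n"
    ((PySem.List.sorted lines_dict.keys id).map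
      (fun i => PySem.Str.join " " (lines_dict.getD i [])))

-- ===== PORT B =====
def reassemble_sentences_alt (translated_chunks : List String) (chunk_metadata : List (List (String × Int))) : String :=
  let pairs := (translated_chunks.zip chunk_metadata).map (fun p => (getLineIdx p.2, p.1))
  let keys := PySem.List.sorted (PySem.Set.ofList (pairs.map Prod.fst)) id
  PySem.Str.join "\n"
    (keys.map (fun key =>
      PySem.Str.join " " ((pairs.filter (fun p => p.1 == key)).map Prod.snd)))

-- ===== PRECONDITION & SPEC =====
-- Pre_ excludes exactly the inputs where A raises KeyError: a metadata dict reached by the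
-- zip that has no 'line_idx' key.
def Pre_reassemble_sentences (translated_chunks : List String) (chunk_metadata : List (List (String × Int))) : Prop :=
  ∀ p ∈ translated_chunks.zip chunk_metadata, "line_idx" ∈ p.2.map Prod.fst
instance (translated_chunks : List String) (chunk_metadata : List (List (String × Int))) : Decidable (Pre_reassemble_sentences translated_chunks chunk_metadata) := by unfold Pre_reassemble_sentences; infer_instance

def pvWitness_reassemble_sentences : List String × (List (List (String × Int))) :=
  (["hello", "world", "bye"], [[("line_idx", 1)], [("line_idx", 0)], [("line_idx", 1)]])

def Spec_reassemble_sentences (translated_chunks : List String) (chunk_metadata : List (List (String × Int))) (out : String) : Prop := out = reassemble_sentences_alt translated_chunks chunk_metadata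
instance (translated_chunks : List String) (chunk_metadata : List (List (String × Int))) (out : String) : Decidable (Spec_reassemble_sentences translated_chunks chunk_metadata out) := by unfold Spec_reassemble_sentences; infer_instance

-- ===== CLAIM (what is proved, stated in full; the proofs are below) =====
def Claim_equal_reassemble_sentences : Prop := ∀ (translated_chunks : List String) (chunk_metadata : List (List (String × Int))), Dom_reassemble_sentences translated_chunks chunk_metadata → Pre_reassemble_sentences translated_chunks chunk_metadata → Spec_reassemble_sentences translated_chunks chunk_metadata (reassemble_sentences translated_chunks chunk_metadata)

-- ===== LEMMAS AND PROOFS =====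
-- ===== VERDICT (by name: the statement is the Claim_ definition above) =====
theorem reassemble_sentences_spec : Claim_equal_reassemble_sentences := by
  intro tc cm _ _
  unfold Spec_reassemble_sentences reassemble_sentences reassemble_sentences_alt
  rw [show ((tc.zip cm).foldl
        (fun d p => PySem.Dict.modify d (getLineIdx p.2) [] (fun l => l ++ [p.1]))
        PySem.Dict.empty)
      = (((tc.zip cm).map (fun p => (getLineIdx p.2, p.1))).foldl
        (fun d q => PySem.Dict.modify d q.1 [] (fun l => l ++ [q.2]))
        PySem.Dict.empty) from by rw [List.foldl_map]]
  simp only [PySem.Dict.keys_foldl_modify_key, PySem.Dict.getD_foldl_modify_append]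
  simp only [pysem, PySem.Set.ofList, List.foldl_map, List.nil_append]
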